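-- pv_equiv track=rewrite | github.com/poolec4/rbe594_asars_ws | src/rbe594_asars/src/map_traj_gen.py | generate_expanding_search
-- ===== SOURCE A (Python) =====
-- def generate_expanding_search(bounds, start_coord=None, step_size=1):
--     if start_coord is None:
--         x, y = 0, 0
--     else:
--         x = start_coord[0]
--         y = start_coord[1]
--
--     traj = []
--     keep_expanding = True
--
--     while keep_expanding:
--         i = len(traj)
--         if i % 2:  # even
--             if int(i / 2) % 2:
--                 x += step_size * int(i / 2)
--             else:
--                 x -= step_size * int(i / 2)
--         else:  # odd
--             if int(i / 2) % 2:
--                 y += step_size * int(i / 2)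
--             else:
--                 y -= step_size * int(i / 2)
--
--         traj.append([x, y])
--
--         # TODO: develop check of when to stop. check bounds on each side compared to trajectory
--         # for now, stop after a while
--
--         if len(traj) > 100:
--             keep_expanding = False
--
--     return traj
-- ===== SOURCE B (Python) =====
-- def _alt_sum(m):
--     # sum_{j=0}^{m} (-1)**(j+1) * j, valid for m >= -1 (empty sum = 0 at m = -1)
--     return (m + 1) // 2 if m % 2 else -(m // 2)
--
--
-- def generate_expanding_search(bounds, start_coord=None, step_size=1):
--     if start_coord is None:
--         x0, y0 = 0, 0
--     else:
--         x0, y0 = start_coord[0], start_coord[1]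
--     return [[x0 + step_size * _alt_sum((i - 1) // 2),
--              y0 + step_size * _alt_sum(i // 2)] for i in range(101)]
-- ===== Notes on version B (the rewrite author's own statement) =====
-- stated objective: alternative
-- what changed: B replaces A's stateful 101-iteration while loop (running x,y updated via parity tests on the index) by a stateless closed-form: point i is start + step_size * alternating-sum offsets computed directly from i by _alt_sum(m) = (m+1)//2 if m is odd else -(m//2), emitted as a single list comprehension over range(101).
import Mathlib
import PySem

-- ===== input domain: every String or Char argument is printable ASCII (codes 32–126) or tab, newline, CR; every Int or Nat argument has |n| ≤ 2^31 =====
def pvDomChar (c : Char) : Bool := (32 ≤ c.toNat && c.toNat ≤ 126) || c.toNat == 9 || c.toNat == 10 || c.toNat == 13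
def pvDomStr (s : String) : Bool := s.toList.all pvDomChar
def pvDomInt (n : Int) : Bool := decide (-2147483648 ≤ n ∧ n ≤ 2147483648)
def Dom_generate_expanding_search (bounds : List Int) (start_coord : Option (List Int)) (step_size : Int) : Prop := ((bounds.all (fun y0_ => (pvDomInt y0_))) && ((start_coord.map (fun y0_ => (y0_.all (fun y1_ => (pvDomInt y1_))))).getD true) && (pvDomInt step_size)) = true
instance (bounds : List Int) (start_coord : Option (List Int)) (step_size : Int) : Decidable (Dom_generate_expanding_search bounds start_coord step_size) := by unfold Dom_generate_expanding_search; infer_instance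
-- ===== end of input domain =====

-- B replaces A's stateful 101-iteration loop by a closed-form formula: point i is
-- start + step * (alternating-sum offsets computed directly from i) (objective: alternative).

-- ===== PORT A =====
-- the while loop of A; i = len(traj); int(i/2) = i/2 on these nonnegative i
def pvLoopA (step x y : Int) (traj : List (List Int)) : List (List Int) :=
  let i := traj.length
  let x' := if i % 2 = 1 then
              (if (i / 2) % 2 = 1 then x + step * ((i / 2 : Nat) : Int)
               else x - step * ((i / 2 : Nat) : Int))
            else x
  let y' := if i % 2 = 1 then y
            else (if (i / 2) % 2 = 1 then y + step * ((i / 2 : Nat) : Int)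
                  else y - step * ((i / 2 : Nat) : Int))
  let traj' := traj ++ [[x', y']]
  if traj'.length > 100 then traj' else pvLoopA step x' y' traj'
termination_by 101 - traj.length
decreasing_by simp only [traj', List.length_append, List.length_cons, List.length_nil, Nat.not_lt] at *; omega

def generate_expanding_search (bounds : List Int) (start_coord : Option (List Int)) (step_size : Int) : List (List Int) :=
  match start_coord with
  | none => pvLoopA step_size 0 0 []
  | some l => pvLoopA step_size ((PySem.List.pyGet? l 0).getD 0) ((PySem.List.pyGet? l 1).getD 0) []

-- ===== PORT B =====
-- _alt_sum(m) = (m+1)//2 if m % 2 else -(m//2)   (Python floor division, divisor 2)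
def pvAltSum (m : Int) : Int :=
  if PySem.Int.mod m 2 ≠ 0 then PySem.Int.floordiv (m + 1) 2 else -(PySem.Int.floordiv m 2)

def generate_expanding_search_alt (bounds : List Int) (start_coord : Option (List Int)) (step_size : Int) : List (List Int) :=
  match start_coord with
  | none =>
    (PySem.List.pyRange 0 101 1).map (fun i =>
      [0 + step_size * pvAltSum (PySem.Int.floordiv (i - 1) 2),
       0 + step_size * pvAltSum (PySem.Int.floordiv i 2)])
  | some l =>
    let x0 := (PySem.List.pyGet? l 0).getD 0
    let y0 := (PySem.List.pyGet? l 1).getD 0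
    (PySem.List.pyRange 0 101 1).map (fun i =>
      [x0 + step_size * pvAltSum (PySem.Int.floordiv (i - 1) 2),
       y0 + step_size * pvAltSum (PySem.Int.floordiv i 2)])

-- ===== PRECONDITION & SPEC =====
-- Pre_ excludes only the inputs where A raises (IndexError): start_coord given but shorter than 2.
def Pre_generate_expanding_search (bounds : List Int) (start_coord : Option (List Int)) (step_size : Int) : Prop :=
  2 ≤ (start_coord.getD [0, 0]).length
instance (bounds : List Int) (start_coord : Option (List Int)) (step_size : Int) : Decidable (Pre_generate_expanding_search bounds start_coord step_size) := by unfold Pre_generate_expanding_search; infer_instance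

def pvWitness_generate_expanding_search : List Int × Option (List Int) × Int := ([0, 0, 10, 10], some [3, -2], 2)

def Spec_generate_expanding_search (bounds : List Int) (start_coord : Option (List Int)) (step_size : Int) (out : List (List Int)) : Prop := out = generate_expanding_search_alt bounds start_coord step_size
instance (bounds : List Int) (start_coord : Option (List Int)) (step_size : Int) (out : List (List Int)) : Decidable (Spec_generate_expanding_search bounds start_coord step_size out) := by unfold Spec_generate_expanding_search; infer_instance

-- ===== CLAIM (what is proved, stated in full; the proofs are below) =====
def Claim_equal_generate_expanding_search : Prop := ∀ (bounds : List Int) (start_coord : Option (List Int)) (step_size : Int), Dom_generate_expanding_search bounds start_coord step_size → Pre_generate_expanding_search bounds start_coord step_size → Spec_generate_expanding_search bounds start_coord step_size (generate_expanding_search bounds start_coord step_size)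

-- ===== LEMMAS AND PROOFS =====

-- B's closed-form x/y offsets at index i (as pure functions of i)
def pvFx (i : Int) : Int := pvAltSum (PySem.Int.floordiv (i - 1) 2)
def pvFy (i : Int) : Int := pvAltSum (PySem.Int.floordiv i 2)

-- A's per-step x/y increments at index n (step_size factored out)
def pvCX (n : Nat) : Int :=
  if n % 2 = 1 then (if (n / 2) % 2 = 1 then ((n / 2 : Nat) : Int) else -((n / 2 : Nat) : Int)) else 0
def pvCY (n : Nat) : Int :=
  if n % 2 = 1 then 0 else (if (n / 2) % 2 = 1 then ((n / 2 : Nat) : Int) else -((n / 2 : Nat) : Int))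

-- the closed form satisfies A's recurrence on every index the loop visits
lemma pvStepFact : ∀ n ∈ List.range 101,
    pvFx (n : Int) = pvFx ((n : Int) - 1) + pvCX n ∧ pvFy (n : Int) = pvFy ((n : Int) - 1) + pvCY n := by
  decide

def pvFull (step x0 y0 : Int) : List (List Int) :=
  (List.range 101).map (fun (j : Nat) => [x0 + step * pvFx (j : Int), y0 + step * pvFy (j : Int)])

lemma pvFull_length (step x0 y0 : Int) : (pvFull step x0 y0).length = 101 := by
  simp [pvFull]

-- loop invariant: entering A's loop with the first n closed-form points yields the full list
lemma pvLoop_inv (step x0 y0 : Int) : ∀ (m n : Nat), n + m = 101 → n ≤ 100 →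
    pvLoopA step (x0 + step * pvFx ((n : Int) - 1)) (y0 + step * pvFy ((n : Int) - 1))
      ((pvFull step x0 y0).take n) = pvFull step x0 y0 := by
  intro m
  induction m with
  | zero => intro n h1 h2; omega
  | succ m ih =>
    intro n h1 h2
    have hlen : ((pvFull step x0 y0).take n).length = n := by
      rw [List.length_take, pvFull_length]; omega
    rw [pvLoopA]
    simp only [hlen]
    have hfact := pvStepFact n (by simp; omega)
    have hx : (if n % 2 = 1 then
          (if (n / 2) % 2 = 1 then x0 + step * pvFx ((n : Int) - 1) + step * ((n / 2 : Nat) : Int)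
           else x0 + step * pvFx ((n : Int) - 1) - step * ((n / 2 : Nat) : Int))
        else x0 + step * pvFx ((n : Int) - 1)) = x0 + step * pvFx (n : Int) := by
      rcases hfact with ⟨hfx, _⟩
      unfold pvCX at hfx
      split_ifs at hfx ⊢ <;> rw [hfx] <;> ring
    have hy : (if n % 2 = 1 then y0 + step * pvFy ((n : Int) - 1)
        else (if (n / 2) % 2 = 1 then y0 + step * pvFy ((n : Int) - 1) + step * ((n / 2 : Nat) : Int)
              else y0 + step * pvFy ((n : Int) - 1) - step * ((n / 2 : Nat) : Int))) =
        y0 + step * pvFy (n : Int) := by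
      rcases hfact with ⟨_, hfy⟩
      unfold pvCY at hfy
      split_ifs at hfy ⊢ <;> rw [hfy] <;> ring
    rw [hx, hy]
    have hlt : n < (pvFull step x0 y0).length := by rw [pvFull_length]; omega
    have hget : (pvFull step x0 y0)[n]'hlt =
        [x0 + step * pvFx (n : Int), y0 + step * pvFy (n : Int)] := by
      simp only [pvFull, List.getElem_map, List.getElem_range]
    have htake : (pvFull step x0 y0).take n ++ [[x0 + step * pvFx (n : Int), y0 + step * pvFy (n : Int)]]
        = (pvFull step x0 y0).take (n + 1) := by
      rw [← hget, ← List.concat_eq_append, List.take_concat_get]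
    rw [htake]
    have hlen' : ((pvFull step x0 y0).take (n + 1)).length = n + 1 := by
      rw [List.length_take, pvFull_length]; omega
    by_cases h : n + 1 > 100
    · rw [if_pos (by rw [hlen']; omega)]
      have h101 : n + 1 = 101 := by omega
      rw [h101, List.take_of_length_le (by rw [pvFull_length])]
    · rw [if_neg (by rw [hlen']; omega)]
      have hrec := ih (n + 1) (by omega) (by omega)
      have hc : ((n + 1 : Nat) : Int) - 1 = (n : Int) := by push_cast; ring
      rw [hc] at hrec
      exact hrec

lemma pvLoop_closed (step x0 y0 : Int) : pvLoopA step x0 y0 [] = pvFull step x0 y0 := by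
  have h := pvLoop_inv step x0 y0 101 0 rfl (by omega)
  have e1 : pvFx (((0 : Nat) : Int) - 1) = 0 := by decide
  have e2 : pvFy (((0 : Nat) : Int) - 1) = 0 := by decide
  rw [e1, e2] at h
  simpa using h

lemma pvRange_eq : PySem.List.pyRange 0 101 1 = (List.range 101).map (fun (j : Nat) => (j : Int)) := by
  decide

lemma pvMap_eq (step x0 y0 : Int) :
    (PySem.List.pyRange 0 101 1).map (fun i =>
      [x0 + step * pvAltSum (PySem.Int.floordiv (i - 1) 2),
       y0 + step * pvAltSum (PySem.Int.floordiv i 2)]) = pvFull step x0 y0 := by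
  rw [pvRange_eq, List.map_map, pvFull]
  apply List.map_congr_left
  intro j hj
  rfl

-- ===== VERDICT (by name: the statement is the Claim_ definition above) =====
theorem generate_expanding_search_spec : Claim_equal_generate_expanding_search := by
  intro bounds sc step _ _
  cases sc with
  | none =>
    simp only [Spec_generate_expanding_search, generate_expanding_search,
      generate_expanding_search_alt]
    rw [pvLoop_closed, pvMap_eq]
  | some l =>
    simp only [Spec_generate_expanding_search, generate_expanding_search,
      generate_expanding_search_alt]
    rw [pvLoop_closed, pvMap_eq]
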